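-- pv_equiv track=rewrite | github.com/CS3398-Espresso-Noir/-CS3398-Espresso-F2017 | Umbrella/backend/google-cloud-sdk/lib/googlecloudsdk/api_lib/compute/filter_rewrite.py | ConvertREPatternToFullMatch
-- ===== SOURCE A (Python) =====
-- def ConvertREPatternToFullMatch(pattern, wordmatch=False):
--   """Returns filter ~ pattern converted to a full match RE pattern.
--
--   This function converts pattern such that the compute filter expression
--     subject eq ConvertREPatternToFullMatch(pattern)
--   matches (the entire subject matches) IFF
--     re.search(pattern, subject)  # wordmatch=False
--   matches (pattern matches anywhere in subject).
--
--   Args: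
--     pattern: A RE pattern that partially matches the subject string.
--     wordmatch: True if ^ and $ anchors should be converted to word boundaries.
--
--   Returns:
--     The converted ~ pattern suitable for the compute eq filter match operator.
--   """
--   if wordmatch:
--     # Convert ^ and $ to \b except if they are in a [...] character class or are
--     # \^ or \$ escaped.
--
--     # 0: not in class, 1: first class char, 2: subsequent class chars
--     cclass = 0
--     # False: next char is not escaped, True: next char is escaped (literal)
--     escape = False
--     full = []
--     for c in pattern:
--       if escape:
--         escape = False
--       elif c == '\\':
--         escape = True
--       elif cclass:
--         if c == ']':
--           if cclass == 1:
--             cclass = 2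
--           else:
--             cclass = 0
--         elif c != '^':
--           cclass = 2
--       elif c == '[':
--         cclass = 1
--       elif c in ('^', '$'):
--         c = r'\b'
--       full.append(c)
--     pattern = ''.join(full)
--   return '".*(' + pattern.replace('"', r'\"') + ').*"'
-- ===== SOURCE B (Python) =====
-- def ConvertREPatternToFullMatch(pattern, wordmatch=False):
--   if wordmatch:
--     n = len(pattern)
--     i = 0
--     parts = []
--     while i < n:
--       c = pattern[i]
--       if c == '\\':
--         parts.append(pattern[i:i + 2])
--         i += 2
--       elif c == '[':
--         # find the end of the character class; a ']' occurring while we are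
--         # still in leading '^'/escape position is literal
--         j = i + 1
--         while j < n and pattern[j] in '^\\':
--           j += 2 if pattern[j] == '\\' else 1
--         if j < n and pattern[j] == ']':
--           j += 1
--         while j < n:
--           d = pattern[j]
--           if d == '\\':
--             j += 2
--           elif d == ']':
--             j += 1
--             break
--           else:
--             j += 1
--         parts.append(pattern[i:j])
--         i = j
--       elif c in ('^', '$'):
--         parts.append('\\b')
--         i += 1
--       else:
--         parts.append(c)
--         i += 1
--     pattern = ''.join(parts)
--   return '".*(' + pattern.replace('"', '\\"') + ').*"'
-- ===== Notes on version B (the rewrite author's own statement) =====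
-- stated objective: alternative
-- what changed: Replaced A's per-character cclass/escape state-machine fold with an index-based segment scanner: escape pairs are copied in one two-character step, each character class is copied verbatim after locating its closing bracket (honouring leading caret and literal-bracket rules), and unescaped unclassed anchors become word boundaries.
import Mathlib
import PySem

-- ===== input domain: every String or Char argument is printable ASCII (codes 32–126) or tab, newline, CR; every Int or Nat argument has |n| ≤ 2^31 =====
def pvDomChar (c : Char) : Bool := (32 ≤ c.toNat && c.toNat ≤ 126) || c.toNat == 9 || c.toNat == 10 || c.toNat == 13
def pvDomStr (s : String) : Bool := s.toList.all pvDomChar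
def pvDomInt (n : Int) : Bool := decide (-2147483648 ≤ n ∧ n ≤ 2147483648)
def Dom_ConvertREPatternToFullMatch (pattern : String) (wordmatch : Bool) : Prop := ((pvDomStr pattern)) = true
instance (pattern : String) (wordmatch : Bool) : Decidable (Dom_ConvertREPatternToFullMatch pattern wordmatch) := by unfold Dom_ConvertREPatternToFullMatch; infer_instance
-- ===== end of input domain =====

-- B replaces A's per-character escape/class state machine with a segment scanner that
-- copies escape pairs and whole character classes verbatim (objective: alternative decomposition).

-- ===== PORT A =====
-- one step of A's for-loop; state = (cclass, escape, full)
def pvA_step (st : Nat × Bool × List Char) (c : Char) : Nat × Bool × List Char :=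
  match st with
  | (cclass, escape, full) =>
    if escape then (cclass, false, full ++ [c])
    else if c = '\\' then (cclass, true, full ++ [c])
    else if cclass ≠ 0 then
      if c = ']' then
        (if cclass = 1 then 2 else 0, false, full ++ [c])
      else if c ≠ '^' then (2, false, full ++ [c])
      else (cclass, false, full ++ [c])
    else if c = '[' then (1, false, full ++ [c])
    else if c = '^' ∨ c = '$' then (cclass, false, full ++ ['\\', 'b'])
    else (cclass, false, full ++ [c])

def ConvertREPatternToFullMatch (pattern : String) (wordmatch : Bool) : String :=
  let pattern :=
    if wordmatch then
      String.mk (pattern.toList.foldl pvA_step (0, false, [])).2.2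
    else pattern
  "\".*(" ++ PySem.Str.replace pattern "\"" "\\\"" ++ ").*\""

-- ===== PORT B =====
-- B's inner while loop (after the literal-']' check): copy up to and including the
-- closing ']' of a character class, escape pairs verbatim; returns (copied, rest)
def pvB_cl2 : List Char → List Char × List Char
  | [] => ([], [])
  | d :: rest =>
    if d = '\\' then
      match rest with
      | [] => (['\\'], [])
      | e :: rest' => let p := pvB_cl2 rest'; ('\\' :: e :: p.1, p.2)
    else if d = ']' then ([']'], rest)
    else let p := pvB_cl2 rest; (d :: p.1, p.2)

-- B's leading phase of a class: skip '^'s and escape pairs, then a ']' is literal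
def pvB_cl1 : List Char → List Char × List Char
  | [] => ([], [])
  | d :: rest =>
    if d = '^' then let p := pvB_cl1 rest; ('^' :: p.1, p.2)
    else if d = '\\' then
      match rest with
      | [] => (['\\'], [])
      | e :: rest' => let p := pvB_cl1 rest'; ('\\' :: e :: p.1, p.2)
    else if d = ']' then let p := pvB_cl2 rest; (']' :: p.1, p.2)
    else pvB_cl2 (d :: rest)

-- equation lemmas for the scanners (cl-level ones are needed for pvB_main's termination)
theorem cl2_nil : pvB_cl2 [] = ([], []) := rfl
theorem cl2_esc1 : pvB_cl2 ['\\'] = (['\\'], []) := by rw [pvB_cl2.eq_def]; simp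
theorem cl2_esc (e : Char) (r : List Char) :
    pvB_cl2 ('\\' :: e :: r) = ('\\' :: e :: (pvB_cl2 r).1, (pvB_cl2 r).2) := by
  rw [pvB_cl2.eq_def]; simp
theorem cl2_close (r : List Char) : pvB_cl2 (']' :: r) = ([']'], r) := by
  rw [pvB_cl2.eq_def]; simp
theorem cl2_other (d : Char) (r : List Char) (h1 : d ≠ '\\') (h2 : d ≠ ']') :
    pvB_cl2 (d :: r) = (d :: (pvB_cl2 r).1, (pvB_cl2 r).2) := by
  rw [pvB_cl2.eq_def]; simp [h1, h2]
theorem cl1_nil : pvB_cl1 [] = ([], []) := rfl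
theorem cl1_caret (r : List Char) :
    pvB_cl1 ('^' :: r) = ('^' :: (pvB_cl1 r).1, (pvB_cl1 r).2) := by
  rw [pvB_cl1.eq_def]; simp
theorem cl1_esc1 : pvB_cl1 ['\\'] = (['\\'], []) := by rw [pvB_cl1.eq_def]; simp
theorem cl1_esc (e : Char) (r : List Char) :
    pvB_cl1 ('\\' :: e :: r) = ('\\' :: e :: (pvB_cl1 r).1, (pvB_cl1 r).2) := by
  rw [pvB_cl1.eq_def]; simp
theorem cl1_close (r : List Char) :
    pvB_cl1 (']' :: r) = (']' :: (pvB_cl2 r).1, (pvB_cl2 r).2) := by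
  rw [pvB_cl1.eq_def]; simp
theorem cl1_other (d : Char) (r : List Char) (h1 : d ≠ '^') (h2 : d ≠ '\\') (h3 : d ≠ ']') :
    pvB_cl1 (d :: r) = pvB_cl2 (d :: r) := by
  rw [pvB_cl1.eq_def]; simp [h1, h2, h3]

theorem pvB_cl2_len : ∀ l : List Char, (pvB_cl2 l).2.length ≤ l.length := by
  intro l
  induction l using pvB_cl2.induct with
  | case1 => simp [cl2_nil]
  | case2 => simp [cl2_esc1]
  | case3 e r ih => rw [cl2_esc]; simp only [List.length_cons]; omega
  | case4 r => rw [cl2_close]; simp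
  | case5 d r h1 h2 ih => rw [cl2_other d r h1 h2]; simp only [List.length_cons]; omega

theorem pvB_cl1_len : ∀ l : List Char, (pvB_cl1 l).2.length ≤ l.length := by
  intro l
  induction l using pvB_cl1.induct with
  | case1 => simp [cl1_nil]
  | case2 r ih => rw [cl1_caret]; simp only [List.length_cons]; omega
  | case3 h => simp [cl1_esc1]
  | case4 e r h ih => rw [cl1_esc]; simp only [List.length_cons]; omega
  | case5 r h1 h2 =>
      rw [cl1_close]; have := pvB_cl2_len r; simp only [List.length_cons]; omega
  | case6 d r h1 h2 h3 =>
      rw [cl1_other d r h1 h2 h3]; exact pvB_cl2_len _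

-- B's outer while loop over the pattern
def pvB_main : List Char → List Char
  | [] => []
  | c :: rest =>
    if c = '\\' then
      match rest with
      | [] => ['\\']
      | e :: rest' => '\\' :: e :: pvB_main rest'
    else if c = '[' then
      let p := pvB_cl1 rest
      ('[' :: p.1) ++ pvB_main p.2
    else if c = '^' ∨ c = '$' then '\\' :: 'b' :: pvB_main rest
    else c :: pvB_main rest
termination_by l => l.length
decreasing_by
  all_goals simp only [List.length_cons]
  · omega
  · have := pvB_cl1_len rest; omega
  · omega
  · omega

def ConvertREPatternToFullMatch_alt (pattern : String) (wordmatch : Bool) : String :=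
  let pattern :=
    if wordmatch then String.mk (pvB_main pattern.toList) else pattern
  "\".*(" ++ PySem.Str.replace pattern "\"" "\\\"" ++ ").*\""

-- ===== PRECONDITION & SPEC =====
def Spec_ConvertREPatternToFullMatch (pattern : String) (wordmatch : Bool) (out : String) : Prop := out = ConvertREPatternToFullMatch_alt pattern wordmatch
instance (pattern : String) (wordmatch : Bool) (out : String) : Decidable (Spec_ConvertREPatternToFullMatch pattern wordmatch out) := by unfold Spec_ConvertREPatternToFullMatch; infer_instance

-- ===== CLAIM (what is proved, stated in full; the proofs are below) =====
def Claim_equal_ConvertREPatternToFullMatch : Prop := ∀ (pattern : String) (wordmatch : Bool), Dom_ConvertREPatternToFullMatch pattern wordmatch → Spec_ConvertREPatternToFullMatch pattern wordmatch (ConvertREPatternToFullMatch pattern wordmatch)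

-- ===== LEMMAS AND PROOFS =====

-- equation lemmas for pvB_main
theorem main_nil : pvB_main [] = [] := by rw [pvB_main.eq_def]
theorem main_esc1 : pvB_main ['\\'] = ['\\'] := by rw [pvB_main.eq_def]; simp
theorem main_esc (e : Char) (r : List Char) :
    pvB_main ('\\' :: e :: r) = '\\' :: e :: pvB_main r := by
  rw [pvB_main.eq_def]; simp
theorem main_class (r : List Char) :
    pvB_main ('[' :: r) = ('[' :: (pvB_cl1 r).1) ++ pvB_main (pvB_cl1 r).2 := by
  rw [pvB_main.eq_def]; simp
theorem main_anchor (c : Char) (r : List Char) (h : c = '^' ∨ c = '$') :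
    pvB_main (c :: r) = '\\' :: 'b' :: pvB_main r := by
  rcases h with h | h <;> subst h <;> (rw [pvB_main.eq_def]; simp)
theorem main_other (c : Char) (r : List Char)
    (h1 : c ≠ '\\') (h2 : c ≠ '[') (h3 : c ≠ '^') (h4 : c ≠ '$') :
    pvB_main (c :: r) = c :: pvB_main r := by
  rw [pvB_main.eq_def]; simp [h1, h2, h3, h4]

-- evaluation lemmas for A's step function
theorem stepA_escOn (k : Nat) (acc : List Char) (c : Char) :
    pvA_step (k, true, acc) c = (k, false, acc ++ [c]) := by simp [pvA_step]
theorem stepA_bs (k : Nat) (acc : List Char) :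
    pvA_step (k, false, acc) '\\' = (k, true, acc ++ ['\\']) := by simp [pvA_step]
theorem stepA_0_class (acc : List Char) :
    pvA_step (0, false, acc) '[' = (1, false, acc ++ ['[']) := by simp [pvA_step]
theorem stepA_0_anchor (acc : List Char) (c : Char) (h : c = '^' ∨ c = '$') :
    pvA_step (0, false, acc) c = (0, false, acc ++ ['\\', 'b']) := by
  rcases h with h | h <;> subst h <;> simp [pvA_step]
theorem stepA_0_other (acc : List Char) (c : Char)
    (h1 : c ≠ '\\') (h2 : c ≠ '[') (h3 : c ≠ '^') (h4 : c ≠ '$') :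
    pvA_step (0, false, acc) c = (0, false, acc ++ [c]) := by simp [pvA_step, h1, h2, h3, h4]
theorem stepA_1_close (acc : List Char) :
    pvA_step (1, false, acc) ']' = (2, false, acc ++ [']']) := by simp [pvA_step]
theorem stepA_1_caret (acc : List Char) :
    pvA_step (1, false, acc) '^' = (1, false, acc ++ ['^']) := by simp [pvA_step]
theorem stepA_1_other (acc : List Char) (c : Char)
    (h1 : c ≠ '\\') (h2 : c ≠ ']') (h3 : c ≠ '^') :
    pvA_step (1, false, acc) c = (2, false, acc ++ [c]) := by simp [pvA_step, h1, h2, h3]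
theorem stepA_2_close (acc : List Char) :
    pvA_step (2, false, acc) ']' = (0, false, acc ++ [']']) := by simp [pvA_step]
theorem stepA_2_other (acc : List Char) (c : Char) (h1 : c ≠ '\\') (h2 : c ≠ ']') :
    pvA_step (2, false, acc) c = (2, false, acc ++ [c]) := by
  by_cases h3 : c = '^' <;> simp [pvA_step, h1, h2, h3]

-- joint invariant: running A's fold from each reachable (cclass, escape=false) state
-- produces the corresponding B segment
theorem pvAB_inv : ∀ (n : Nat) (l : List Char), l.length ≤ n →
    (∀ acc, (l.foldl pvA_step (0, false, acc)).2.2 = acc ++ pvB_main l) ∧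
    (∀ acc, (l.foldl pvA_step (1, false, acc)).2.2
        = acc ++ (pvB_cl1 l).1 ++ pvB_main (pvB_cl1 l).2) ∧
    (∀ acc, (l.foldl pvA_step (2, false, acc)).2.2
        = acc ++ (pvB_cl2 l).1 ++ pvB_main (pvB_cl2 l).2) := by
  intro n
  induction n with
  | zero =>
    intro l hl
    have hnil : l = [] := List.eq_nil_of_length_eq_zero (Nat.le_zero.mp hl)
    subst hnil
    refine ⟨?_, ?_, ?_⟩ <;> intro acc <;> simp [main_nil, cl1_nil, cl2_nil]
  | succ n ih =>
    intro l hl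
    cases l with
    | nil => refine ⟨?_, ?_, ?_⟩ <;> intro acc <;> simp [main_nil, cl1_nil, cl2_nil]
    | cons c rest =>
      have hrest : rest.length ≤ n := by simp only [List.length_cons] at hl; omega
      refine ⟨?_, ?_, ?_⟩ <;> intro acc
      · -- state 0
        by_cases hbs : c = '\\'
        · subst hbs
          cases rest with
          | nil => simp [stepA_bs, main_esc1]
          | cons e rest' =>
            have hr' : rest'.length ≤ n := by
              simp only [List.length_cons] at hrest; omega
            simp only [List.foldl_cons, stepA_bs, stepA_escOn]
            rw [(ih rest' hr').1, main_esc]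
            simp
        · by_cases hcl : c = '['
          · subst hcl
            simp only [List.foldl_cons, stepA_0_class]
            rw [(ih rest hrest).2.1, main_class]
            simp
          · by_cases han : c = '^' ∨ c = '$'
            · simp only [List.foldl_cons, stepA_0_anchor acc c han]
              rw [(ih rest hrest).1, main_anchor c rest han]
              simp
            · push_neg at han
              simp only [List.foldl_cons, stepA_0_other acc c hbs hcl han.1 han.2]
              rw [(ih rest hrest).1, main_other c rest hbs hcl han.1 han.2]
              simp
      · -- state 1
        by_cases hbs : c = '\\'
        · subst hbs
          cases rest with
          | nil => simp [stepA_bs, cl1_esc1, main_nil]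
          | cons e rest' =>
            have hr' : rest'.length ≤ n := by
              simp only [List.length_cons] at hrest; omega
            simp only [List.foldl_cons, stepA_bs, stepA_escOn]
            rw [(ih rest' hr').2.1, cl1_esc]
            simp
        · by_cases hcc : c = ']'
          · subst hcc
            simp only [List.foldl_cons, stepA_1_close]
            rw [(ih rest hrest).2.2, cl1_close]
            simp
          · by_cases hca : c = '^'
            · subst hca
              simp only [List.foldl_cons, stepA_1_caret]
              rw [(ih rest hrest).2.1, cl1_caret]
              simp
            · simp only [List.foldl_cons, stepA_1_other acc c hbs hcc hca]
              rw [(ih rest hrest).2.2, cl1_other c rest hca hbs hcc,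
                cl2_other c rest hbs hcc]
              simp
      · -- state 2
        by_cases hbs : c = '\\'
        · subst hbs
          cases rest with
          | nil => simp [stepA_bs, cl2_esc1, main_nil]
          | cons e rest' =>
            have hr' : rest'.length ≤ n := by
              simp only [List.length_cons] at hrest; omega
            simp only [List.foldl_cons, stepA_bs, stepA_escOn]
            rw [(ih rest' hr').2.2, cl2_esc]
            simp
        · by_cases hcc : c = ']'
          · subst hcc
            simp only [List.foldl_cons, stepA_2_close]
            rw [(ih rest hrest).1, cl2_close]
          · simp only [List.foldl_cons, stepA_2_other acc c hbs hcc]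
            rw [(ih rest hrest).2.2, cl2_other c rest hbs hcc]
            simp

-- ===== VERDICT (by name: the statement is the Claim_ definition above) =====
theorem ConvertREPatternToFullMatch_spec : Claim_equal_ConvertREPatternToFullMatch := by
  intro pattern wordmatch _
  unfold Spec_ConvertREPatternToFullMatch ConvertREPatternToFullMatch ConvertREPatternToFullMatch_alt
  cases wordmatch with
  | false => rfl
  | true =>
    simp only [if_pos]
    have h := (pvAB_inv pattern.toList.length pattern.toList le_rfl).1 []
    rw [h, List.nil_append]
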